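-- pv_equiv track=rewrite | github.com/LyMuc/GR2-VRP4 | vrpspd-demo/algorithms/utils.py | convert_vector_to_routes
-- ===== SOURCE A (Python) =====
-- def convert_vector_to_routes(vector):
--     """
--     Chuyển đổi vector representation về danh sách tuyến.
--
--     Args:
--         vector (list): [0, 1, 2, 0, 3, 4, 0]
--
--     Returns:
--         list of lists: [[1, 2], [3, 4]]
--     """
--     routes = []
--     current_route = []
--     for node in vector[1:]:
--         if node != 0:
--             current_route.append(node)
--         else:
--             if current_route:
--                 routes.append(current_route)
--             current_route = []
--     return routes
-- ===== SOURCE B (Python) =====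
-- def convert_vector_to_routes(vector):
--     """Recursive splitter: cut at the first zero, emit the (nonempty) prefix,
--     recurse on the rest; a zero-free tail yields no route (A only flushes at zeros)."""
--     def split(xs):
--         try:
--             i = xs.index(0)
--         except ValueError:
--             return []
--         head = xs[:i]
--         return ([head] if head else []) + split(xs[i + 1:])
--     return split(vector[1:])
-- ===== Notes on version B (the rewrite author's own statement) =====
-- stated objective: alternative
-- what changed: Replaces A's element-by-element accumulator/flush state machine with a recursive splitter that jumps directly to the next zero via list.index and slices out each route.
import Mathlib
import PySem

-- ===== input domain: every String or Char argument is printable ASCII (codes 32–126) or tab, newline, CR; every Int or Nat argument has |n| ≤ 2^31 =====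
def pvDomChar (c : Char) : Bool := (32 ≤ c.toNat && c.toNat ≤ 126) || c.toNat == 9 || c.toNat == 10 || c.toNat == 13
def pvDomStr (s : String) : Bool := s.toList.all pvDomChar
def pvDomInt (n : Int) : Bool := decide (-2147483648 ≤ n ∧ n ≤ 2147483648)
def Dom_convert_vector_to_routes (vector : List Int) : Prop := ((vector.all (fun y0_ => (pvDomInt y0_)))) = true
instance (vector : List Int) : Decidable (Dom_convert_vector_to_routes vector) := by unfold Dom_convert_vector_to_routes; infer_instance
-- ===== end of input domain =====

-- B replaces A's element-by-element accumulator/flush state machine by a recursive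
-- splitter that jumps to the first zero with list.index and slices (objective: simpler).

-- ===== PORT A =====
-- one loop step: 'if node != 0: current_route.append(node) else: flush'
def pvAStep (s : List (List Int) × List Int) (node : Int) : List (List Int) × List Int :=
  if node ≠ 0 then (s.1, s.2 ++ [node])
  else if s.2 ≠ [] then (s.1 ++ [s.2], []) else (s.1, [])

def convert_vector_to_routes (vector : List Int) : List (List Int) :=
  -- for node in vector[1:] with state (routes, current_route); return routes
  ((PySem.List.slice vector (some 1) none).foldl pvAStep ([], [])).1

-- ===== PORT B =====
-- xs.index(0) → PySem.List.index?; xs[:i] / xs[i+1:] with i a found index → take / drop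
def pvSplit (xs : List Int) : List (List Int) :=
  match h : PySem.List.index? xs 0 with
  | none => []
  | some i =>
      (if xs.take i ≠ [] then [xs.take i] else []) ++ pvSplit (xs.drop (i + 1))
termination_by xs.length
decreasing_by
  obtain ⟨hk, -, -⟩ := PySem.List.getElem_of_index?_eq_some h
  simp [List.length_drop]; omega

def convert_vector_to_routes_alt (vector : List Int) : List (List Int) :=
  pvSplit (PySem.List.slice vector (some 1) none)

-- ===== PRECONDITION & SPEC =====
def Spec_convert_vector_to_routes (vector : List Int) (out : List (List Int)) : Prop := out = convert_vector_to_routes_alt vector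
instance (vector : List Int) (out : List (List Int)) : Decidable (Spec_convert_vector_to_routes vector out) := by unfold Spec_convert_vector_to_routes; infer_instance

-- ===== CLAIM (what is proved, stated in full; the proofs are below) =====
def Claim_equal_convert_vector_to_routes : Prop := ∀ (vector : List Int), Dom_convert_vector_to_routes vector → Spec_convert_vector_to_routes vector (convert_vector_to_routes vector)

-- ===== LEMMAS AND PROOFS =====

-- pvSplit with a pending current_route c prefixed to the first segment
def pvSplitC (c : List Int) (xs : List Int) : List (List Int) :=
  match PySem.List.index? xs 0 with
  | none => []
  | some i =>
      (if c ++ xs.take i ≠ [] then [c ++ xs.take i] else []) ++ pvSplit (xs.drop (i + 1))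

lemma pvSplitC_nil (xs : List Int) : pvSplitC [] xs = pvSplit xs := by
  unfold pvSplitC
  conv_rhs => unfold pvSplit
  cases h : PySem.List.index? xs 0 with
  | none => rfl
  | some i => simp only [List.nil_append]

lemma pvSplitC_cons_ne (c : List Int) (x : Int) (xs : List Int) (hx : x ≠ 0) :
    pvSplitC c (x :: xs) = pvSplitC (c ++ [x]) xs := by
  unfold pvSplitC
  cases h : PySem.List.index? xs 0 with
  | none => simp only [PySem.List.index?_cons_of_ne xs hx, h, Option.map_none]
  | some i =>
      simp only [PySem.List.index?_cons_of_ne xs hx, h, Option.map_some]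
      simp only [List.take_succ_cons, List.drop_succ_cons, List.append_assoc]
      simp

lemma pvSplitC_cons_zero (c : List Int) (xs : List Int) :
    pvSplitC c (0 :: xs) = (if c ≠ [] then [c] else []) ++ pvSplit xs := by
  unfold pvSplitC
  rw [PySem.List.index?_cons_self]
  simp

lemma pvFoldl_eq_splitC (xs : List Int) :
    ∀ (r : List (List Int)) (c : List Int),
      (xs.foldl pvAStep (r, c)).1 = r ++ pvSplitC c xs := by
  induction xs with
  | nil =>
      intro r c
      unfold pvSplitC
      simp [PySem.List.index?_eq_idxOf?]
  | cons x xs ih =>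
      intro r c
      by_cases hx : x = 0
      · subst hx
        rw [List.foldl_cons]
        by_cases hc : c = []
        · have hst : pvAStep (r, c) 0 = (r, []) := by simp [pvAStep, hc]
          rw [hst, ih r [], pvSplitC_nil, pvSplitC_cons_zero]
          simp [hc]
        · have hst : pvAStep (r, c) 0 = (r ++ [c], []) := by simp [pvAStep, hc]
          rw [hst, ih (r ++ [c]) [], pvSplitC_nil, pvSplitC_cons_zero]
          simp [hc]
      · have hst : pvAStep (r, c) x = (r, c ++ [x]) := by simp [pvAStep, hx]
        rw [List.foldl_cons, hst, ih r (c ++ [x]), pvSplitC_cons_ne c x xs hx]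

-- ===== VERDICT (by name: the statement is the Claim_ definition above) =====
theorem convert_vector_to_routes_spec : Claim_equal_convert_vector_to_routes := by
  intro vector _
  unfold Spec_convert_vector_to_routes convert_vector_to_routes convert_vector_to_routes_alt
  rw [pvFoldl_eq_splitC, pvSplitC_nil]
  simp
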